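-- pv_equiv track=rewrite | github.com/12009/spider | utils/url.py | patternPath
-- ===== SOURCE A (Python) =====
-- def patternPath(path):
--     '''获取路径的模式，以备后续处理'''
--     pattern = ""
--     #1a[alpha],2i[int]
--     flag = ''
--     #整个路径的深度
--     depth = len(path.split('/'))
--
--     if path.split('/')[-1:][0].find('.'):
--         isFile = 1
--         currentPath = "/".join(path.split('/')[:-1])
--         filename = path.split('/')[-1:][0]
--     else:
--         isFile = 0
--         currentPath = path
--
--     current=0
--     patternStr = str(depth) + '-'
--     for i in range(len(currentPath)):
--         num = ord(currentPath[i])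
--         if (num >= 65 and num <= 90) or (num >= 97 and num <= 122):   #A-Z a-z
--             if flag == '':
--                 flag = 'a'
--                 current += 1
--             elif flag == 'a':
--                 current += 1
--             elif flag == 'i':
--                 flag = 'a'
--                 patternStr = patternStr + str(current) + "i"
--                 current = 1
--         elif num >= 48 and num <= 57:   #0-9
--             if flag == '':
--                 flag = 'i'
--                 current += 1
--             elif flag == 'i':
--                 current += 1
--             elif flag == 'a':
--                 flag = 'i'
--                 patternStr = patternStr + str(current) + "a"
--                 current = 1
--         else:
--             if flag == '':
--                 flag = ''
--                 patternStr = patternStr + currentPath[i]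
--             elif flag == 'i':
--                 flag = ''
--                 patternStr = patternStr + str(current) + "i" + currentPath[i]
--             elif flag == 'a':
--                 flag = ''
--                 patternStr = patternStr + str(current) + "a" + currentPath[i]
--             current = 0
--         if i == len(currentPath) - 1:
--             if flag == 'i':
--                 patternStr = patternStr + str(current) + "i"
--             elif flag == 'a':
--                 patternStr = patternStr + str(current) + "a"
--     if isFile:
--         patternStr = patternStr + "/" + filename
--     return patternStr
-- ===== SOURCE B (Python) =====
-- def patternPath(path):
--     '''获取路径的模式，以备后续处理'''
--     parts = path.split('/')
--     depth = len(parts)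
--     isFile = parts[-1].find('.') != 0
--     currentPath = "/".join(parts[:-1]) if isFile else path
--
--     out = [str(depth) + '-']
--     i = 0
--     n = len(currentPath)
--     while i < n:
--         c = currentPath[i]
--         j = i + 1
--         if ('A' <= c <= 'Z') or ('a' <= c <= 'z'):
--             while j < n and (('A' <= currentPath[j] <= 'Z') or ('a' <= currentPath[j] <= 'z')):
--                 j += 1
--             out.append(str(j - i) + 'a')
--         elif '0' <= c <= '9':
--             while j < n and '0' <= currentPath[j] <= '9':
--                 j += 1
--             out.append(str(j - i) + 'i')
--         else:
--             out.append(c)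
--         i = j
--     if isFile:
--         out.append('/' + parts[-1])
--     return ''.join(out)
-- ===== Notes on version B (the rewrite author's own statement) =====
-- stated objective: alternative
-- what changed: Replaces the char-by-char flag/current state machine (with its end-of-loop flush inside the index loop) by a run scanner: while-loop two-pointer grouping that finds each maximal letter/digit run at once and emits its length, collecting pieces in a list joined at the end.
import Mathlib
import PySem

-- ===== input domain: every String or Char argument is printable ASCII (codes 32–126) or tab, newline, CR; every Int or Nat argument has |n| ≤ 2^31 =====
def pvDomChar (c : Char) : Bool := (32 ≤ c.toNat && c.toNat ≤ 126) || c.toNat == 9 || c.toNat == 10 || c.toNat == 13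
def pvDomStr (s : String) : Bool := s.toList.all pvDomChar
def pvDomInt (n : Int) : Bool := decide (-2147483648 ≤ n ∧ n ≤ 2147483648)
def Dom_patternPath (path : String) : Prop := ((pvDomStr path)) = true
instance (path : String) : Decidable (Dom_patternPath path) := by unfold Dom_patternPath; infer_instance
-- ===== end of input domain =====

-- B replaces A's flag/current state machine with a two-pointer maximal-run scanner (same output, same cost; objective: alternative).
-- Strings are ported as their code-point lists (PySem convention); the final value is rebuilt with String.ofList.

-- ===== PORT A =====
-- the loop body's state is (flag, current, patternStr), exactly A's three mutated variables
def pvStepA (st : List Char × Int × List Char) (c : Char) : List Char × Int × List Char :=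
  let flag := st.1
  let current := st.2.1
  let patternStr := st.2.2
  let num : Int := c.toNat          -- num = ord(currentPath[i])
  if (65 ≤ num ∧ num ≤ 90) ∨ (97 ≤ num ∧ num ≤ 122) then   -- A-Z a-z
    if flag = [] then (['a'], current + 1, patternStr)
    else if flag = ['a'] then (flag, current + 1, patternStr)
    else if flag = ['i'] then (['a'], 1, patternStr ++ PySem.Int.toChars current ++ ['i'])
    else (flag, current, patternStr)        -- no elif fires
  else if 48 ≤ num ∧ num ≤ 57 then   -- 0-9
    if flag = [] then (['i'], current + 1, patternStr)
    else if flag = ['i'] then (flag, current + 1, patternStr)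
    else if flag = ['a'] then (['i'], 1, patternStr ++ PySem.Int.toChars current ++ ['a'])
    else (flag, current, patternStr)
  else
    if flag = [] then ([], 0, patternStr ++ [c])
    else if flag = ['i'] then ([], 0, patternStr ++ PySem.Int.toChars current ++ ['i'] ++ [c])
    else if flag = ['a'] then ([], 0, patternStr ++ PySem.Int.toChars current ++ ['a'] ++ [c])
    else (flag, 0, patternStr)

-- the 'if i == len(currentPath) - 1' trailing-run emission
def pvFlushA (st : List Char × Int × List Char) : List Char × Int × List Char :=
  if st.1 = ['i'] then (st.1, st.2.1, st.2.2 ++ PySem.Int.toChars st.2.1 ++ ['i'])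
  else if st.1 = ['a'] then (st.1, st.2.1, st.2.2 ++ PySem.Int.toChars st.2.1 ++ ['a'])
  else st

def pvBodyA (cs : List Char) (n : Int) (st : List Char × Int × List Char) (i : Int) :
    List Char × Int × List Char :=
  let st' := pvStepA st (PySem.List.pyGetD cs i ' ')   -- currentPath[i]; 0 ≤ i < n in the loop, so exact
  if i = n - 1 then pvFlushA st' else st'

def patternPath (path : String) : String :=
  let parts := (PySem.Chars.split? path.toList ['/']).getD []  -- path.split('/'); sep ≠ '' so split? = some, exact
  let depth : Int := parts.length
  -- path.split('/')[-1:][0]; split never returns an empty list, so the [0] is exact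
  let lastSeg := (PySem.List.pyGet? (PySem.List.slice parts (some (-1)) none) 0).getD []
  let ifc : Bool × List Char × List Char :=            -- (isFile, currentPath, filename)
    if PySem.Chars.find lastSeg ['.'] ≠ 0 then         -- Python truthiness of .find('.')
      (true, PySem.Chars.join ['/'] (PySem.List.slice parts none (some (-1))), lastSeg)
    else
      (false, path.toList, [])                         -- filename unset in Python; unused when isFile = 0
  let currentPath := ifc.2.1
  let n : Int := currentPath.length
  let fin := (PySem.List.pyRange 0 n 1).foldl (pvBodyA currentPath n)
               ([], 0, PySem.Int.toChars depth ++ ['-'])   -- flag = '', current = 0, patternStr = str(depth)+'-'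
  String.ofList (if ifc.1 then fin.2.2 ++ ['/'] ++ ifc.2.2 else fin.2.2)

-- ===== PORT B =====
def pvIsAl (c : Char) : Bool := ('A' ≤ c && c ≤ 'Z') || ('a' ≤ c && c ≤ 'z')
def pvIsDig (c : Char) : Bool := ('0' ≤ c && c ≤ '9')

-- Source B's while-loop run scanner: the inner 'while j < n and …: j += 1' is the takeWhile/dropWhile split at j
def pvScanB : List Char → List Char
  | [] => []
  | c :: cs =>
    if pvIsAl c then
      PySem.Int.toChars (((cs.takeWhile pvIsAl).length : Int) + 1) ++ ['a'] ++ pvScanB (cs.dropWhile pvIsAl)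
    else if pvIsDig c then
      PySem.Int.toChars (((cs.takeWhile pvIsDig).length : Int) + 1) ++ ['i'] ++ pvScanB (cs.dropWhile pvIsDig)
    else
      c :: pvScanB cs
termination_by l => l.length
decreasing_by
  · have := List.length_dropWhile_le pvIsAl cs; simp; omega
  · have := List.length_dropWhile_le pvIsDig cs; simp; omega
  · simp

def patternPath_alt (path : String) : String :=
  let parts := (PySem.Chars.split? path.toList ['/']).getD []  -- sep ≠ '' so exact
  let depth : Int := parts.length
  let lastSeg := (PySem.List.pyGet? parts (-1)).getD []        -- parts[-1]; split never returns [], exact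
  let isFile := PySem.Chars.find lastSeg ['.'] ≠ 0
  let currentPath := if isFile then PySem.Chars.join ['/'] (PySem.List.slice parts none (some (-1))) else path.toList
  let core := PySem.Int.toChars depth ++ ['-'] ++ pvScanB currentPath   -- ''.join(out) of the collected pieces
  String.ofList (if isFile then core ++ ['/'] ++ lastSeg else core)

-- ===== PRECONDITION & SPEC =====
def Spec_patternPath (path : String) (out : String) : Prop := out = patternPath_alt path
instance (path : String) (out : String) : Decidable (Spec_patternPath path out) := by unfold Spec_patternPath; infer_instance

-- ===== CLAIM (what is proved, stated in full; the proofs are below) =====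
def Claim_equal_patternPath : Prop := ∀ (path : String), Dom_patternPath path → Spec_patternPath path (patternPath path)

-- ===== LEMMAS AND PROOFS =====

-- A's 'path.split('/')[-1:][0]' equals B's 'parts[-1]' (both default [] on the impossible empty list)
theorem pvLast_eq (l : List (List Char)) :
    (PySem.List.pyGet? (PySem.List.slice l (some (-1)) none) 0).getD [] =
      (PySem.List.pyGet? l (-1)).getD [] := by
  rw [PySem.List.slice_from_neg_one]
  cases l with
  | nil => simp [PySem.List.pyGet?]
  | cons x xs => simp [PySem.List.pyGet?, PySem.List.pyIdx?]

-- proof-side reformulation of A's loop tail: step each char, flush after the last one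
def pvTailA : (List Char × Int × List Char) → List Char → (List Char × Int × List Char)
  | st, [] => st
  | st, c :: rest => if rest.isEmpty then pvFlushA (pvStepA st c) else pvTailA (pvStepA st c) rest

theorem pvLoop_eq (cs : List Char) (j : Nat) (st : List Char × Int × List Char) (hj : j ≤ cs.length) :
    (PySem.List.pyRange (j : Int) (cs.length : Int) 1).foldl (pvBodyA cs (cs.length : Int)) st =
      pvTailA st (cs.drop j) := by
  have hgen : ∀ (k j : Nat) (st : List Char × Int × List Char), j ≤ cs.length → cs.length - j = k →
      (PySem.List.pyRange (j : Int) (cs.length : Int) 1).foldl (pvBodyA cs (cs.length : Int)) st =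
        pvTailA st (cs.drop j) := by
    intro k
    induction k with
    | zero =>
      intro j st hj hk
      have hj' : j = cs.length := by omega
      subst hj'
      rw [PySem.List.pyRange_one_eq_nil (le_refl _)]
      simp [pvTailA]
    | succ k ih =>
      intro j st hj hk
      have hlt : j < cs.length := by omega
      rw [PySem.List.pyRange_one_cons (by exact_mod_cast hlt)]
      have hcast : ((j : Int) + 1) = ((j + 1 : Nat) : Int) := by push_cast; ring
      rw [List.foldl_cons, hcast, ih (j + 1) _ (by omega) (by omega)]
      have hdrop : cs.drop j = cs[j] :: cs.drop (j + 1) := (List.getElem_cons_drop hlt).symm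
      rw [hdrop]
      have hget : PySem.List.pyGetD cs (j : Int) ' ' = cs[j] := by
        rw [PySem.List.pyGetD_eq_getElem cs ' ' (by omega) (by exact_mod_cast hlt)]
        simp
      by_cases hlast : j + 1 = cs.length
      · have hnil : cs.drop (j + 1) = [] := by rw [List.drop_eq_nil_iff]; omega
        have hcond : (j : Int) = (cs.length : Int) - 1 := by omega
        rw [hnil]
        simp [pvTailA, pvBodyA, hcond]
        rw [← hcond, hget]
      · have hne : cs.drop (j + 1) ≠ [] := by rw [Ne, List.drop_eq_nil_iff]; omega
        have hcond : ¬ ((j : Int) = (cs.length : Int) - 1) := by omega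
        have hiE : (cs.drop (j + 1)).isEmpty = false := by simpa [List.isEmpty_iff] using hne
        simp [pvTailA, pvBodyA, hget, hcond, hiE]
  exact hgen (cs.length - j) j st hj rfl

theorem pvTailA_eq (l : List Char) (st : List Char × Int × List Char) (h : l ≠ []) :
    pvTailA st l = pvFlushA (l.foldl pvStepA st) := by
  induction l generalizing st with
  | nil => exact absurd rfl h
  | cons c rest ih =>
    cases rest with
    | nil => simp [pvTailA]
    | cons c2 r2 => simpa [pvTailA] using ih (pvStepA st c) (by simp)

theorem pvAl_iff (c : Char) :
    pvIsAl c = true ↔ (65 ≤ c.toNat ∧ c.toNat ≤ 90) ∨ (97 ≤ c.toNat ∧ c.toNat ≤ 122) := by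
  simp only [pvIsAl, Bool.or_eq_true, Bool.and_eq_true, decide_eq_true_eq, Char.le_def,
    UInt32.le_iff_toNat_le]
  have h : c.toNat = c.val.toNat := rfl
  rw [h]
  constructor
  · rintro (⟨h1,h2⟩|⟨h1,h2⟩) <;> [left; right] <;> constructor <;> simp_all
  · rintro (⟨h1,h2⟩|⟨h1,h2⟩) <;> [left; right] <;> constructor <;> simp_all

theorem pvDig_iff (c : Char) :
    pvIsDig c = true ↔ (48 ≤ c.toNat ∧ c.toNat ≤ 57) := by
  simp only [pvIsDig, Bool.and_eq_true, decide_eq_true_eq, Char.le_def, UInt32.le_iff_toNat_le]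
  have h : c.toNat = c.val.toNat := rfl
  rw [h]
  constructor
  · rintro ⟨h1,h2⟩; constructor <;> simp_all
  · rintro ⟨h1,h2⟩; constructor <;> simp_all

theorem pvIsDig_of_al {c : Char} (h : pvIsAl c = true) : pvIsDig c = false := by
  cases hd : pvIsDig c with
  | false => rfl
  | true =>
    have hAc := (pvAl_iff c).mp h
    exact absurd ((pvDig_iff c).mp hd) (by rcases hAc with h'|h' <;> omega)

-- the machine, run from each of its three reachable flag states, produces B's run encoding
theorem pvRuns (l : List Char) :
    (∀ p, (pvFlushA (l.foldl pvStepA ([], 0, p))).2.2 = p ++ pvScanB l)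
    ∧ (∀ p (k : Int), 1 ≤ k →
        (pvFlushA (l.foldl pvStepA (['a'], k, p))).2.2 =
          p ++ PySem.Int.toChars (k + (l.takeWhile pvIsAl).length) ++ ['a'] ++ pvScanB (l.dropWhile pvIsAl))
    ∧ (∀ p (k : Int), 1 ≤ k →
        (pvFlushA (l.foldl pvStepA (['i'], k, p))).2.2 =
          p ++ PySem.Int.toChars (k + (l.takeWhile pvIsDig).length) ++ ['i'] ++ pvScanB (l.dropWhile pvIsDig)) := by
  induction l with
  | nil =>
    refine ⟨?_, ?_, ?_⟩
    · intro p; simp [pvFlushA, pvScanB]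
    · intro p k hk; simp [pvFlushA, pvScanB]
    · intro p k hk; simp [pvFlushA, pvScanB]
  | cons c l ih =>
    obtain ⟨ihE, ihA, ihI⟩ := ih
    by_cases hA : pvIsAl c = true
    · -- c is a letter
      have hAc := (pvAl_iff c).mp hA
      have hnD : ¬ (48 ≤ c.toNat ∧ c.toNat ≤ 57) := by rcases hAc with h|h <;> omega
      have harg : ∀ k : Int, k + ((l.takeWhile pvIsAl).length + 1 : Nat) = (k + 1) + ((l.takeWhile pvIsAl).length : Nat) := by
        intro k; push_cast; ring
      refine ⟨?_, ?_, ?_⟩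
      · intro p
        rw [List.foldl_cons]
        have hstep : pvStepA ([], 0, p) c = (['a'], 1, p) := by simp [pvStepA, hAc]
        rw [hstep, ihA p 1 (by norm_num)]
        simp [pvScanB, hA, List.append_assoc]
        all_goals (congr 1; ring)
      · intro p k hk
        rw [List.foldl_cons]
        have hstep : pvStepA (['a'], k, p) c = (['a'], k + 1, p) := by simp [pvStepA, hAc]
        rw [hstep, ihA p (k + 1) (by omega),
          List.takeWhile_cons_of_pos hA, List.dropWhile_cons_of_pos hA]
        simp
        all_goals (congr 1; ring)
      · intro p k hk
        rw [List.foldl_cons]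
        have hstep : pvStepA (['i'], k, p) c = (['a'], 1, p ++ PySem.Int.toChars k ++ ['i']) := by
          simp [pvStepA, hAc]
        rw [hstep, ihA _ 1 (by norm_num),
          List.takeWhile_cons_of_neg (by simp [pvIsDig_of_al hA]), List.dropWhile_cons_of_neg (by simp [pvIsDig_of_al hA])]
        simp [pvScanB, hA, List.append_assoc]
        all_goals (congr 1; ring)
    · by_cases hD : pvIsDig c = true
      · -- c is a digit
        have hDc := (pvDig_iff c).mp hD
        have hnA : ¬ ((65 ≤ c.toNat ∧ c.toNat ≤ 90) ∨ (97 ≤ c.toNat ∧ c.toNat ≤ 122)) := by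
          rw [← pvAl_iff]; simp [hA]
        have harg : ∀ k : Int, k + ((l.takeWhile pvIsDig).length + 1 : Nat) = (k + 1) + ((l.takeWhile pvIsDig).length : Nat) := by
          intro k; push_cast; ring
        refine ⟨?_, ?_, ?_⟩
        · intro p
          rw [List.foldl_cons]
          have hstep : pvStepA ([], 0, p) c = (['i'], 1, p) := by simp [pvStepA, hnA, hDc]
          rw [hstep, ihI p 1 (by norm_num)]
          simp [pvScanB, hA, hD, List.append_assoc]
          all_goals (congr 1; ring)
        · intro p k hk
          rw [List.foldl_cons]
          have hstep : pvStepA (['a'], k, p) c = (['i'], 1, p ++ PySem.Int.toChars k ++ ['a']) := by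
            simp [pvStepA, hnA, hDc]
          rw [hstep, ihI _ 1 (by norm_num),
            List.takeWhile_cons_of_neg (by simp [hA]), List.dropWhile_cons_of_neg (by simp [hA])]
          simp [pvScanB, hA, hD, List.append_assoc]
          all_goals (congr 1; ring)
        · intro p k hk
          rw [List.foldl_cons]
          have hstep : pvStepA (['i'], k, p) c = (['i'], k + 1, p) := by simp [pvStepA, hnA, hDc]
          rw [hstep, ihI p (k + 1) (by omega),
            List.takeWhile_cons_of_pos hD, List.dropWhile_cons_of_pos hD]
          simp
          all_goals (congr 1; ring)
      · -- c is neither letter nor digit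
        have hnA : ¬ ((65 ≤ c.toNat ∧ c.toNat ≤ 90) ∨ (97 ≤ c.toNat ∧ c.toNat ≤ 122)) := by
          rw [← pvAl_iff]; simp [hA]
        have hnD : ¬ (48 ≤ c.toNat ∧ c.toNat ≤ 57) := by rw [← pvDig_iff]; simp [hD]
        refine ⟨?_, ?_, ?_⟩
        · intro p
          rw [List.foldl_cons]
          have hstep : pvStepA ([], 0, p) c = ([], 0, p ++ [c]) := by simp [pvStepA, hnA, hnD]
          rw [hstep, ihE]
          simp [pvScanB, hA, hD, List.append_assoc]
        · intro p k hk
          rw [List.foldl_cons]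
          have hstep : pvStepA (['a'], k, p) c = ([], 0, p ++ PySem.Int.toChars k ++ ['a'] ++ [c]) := by
            simp [pvStepA, hnA, hnD]
          rw [hstep, ihE,
            List.takeWhile_cons_of_neg (by simp [hA]), List.dropWhile_cons_of_neg (by simp [hA])]
          simp [pvScanB, hA, hD, List.append_assoc]
        · intro p k hk
          rw [List.foldl_cons]
          have hstep : pvStepA (['i'], k, p) c = ([], 0, p ++ PySem.Int.toChars k ++ ['i'] ++ [c]) := by
            simp [pvStepA, hnA, hnD]
          rw [hstep, ihE,
            List.takeWhile_cons_of_neg (by simp [hD]), List.dropWhile_cons_of_neg (by simp [hD])]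
          simp [pvScanB, hA, hD, List.append_assoc]

theorem pvCore (cs : List Char) (p : List Char) :
    ((PySem.List.pyRange 0 (cs.length : Int) 1).foldl (pvBodyA cs (cs.length : Int)) ([], 0, p)).2.2 =
      p ++ pvScanB cs := by
  have h := pvLoop_eq cs 0 ([], 0, p) (Nat.zero_le _)
  simp only [Nat.cast_zero, List.drop_zero] at h
  rw [h]
  cases cs with
  | nil => simp [pvTailA, pvScanB]
  | cons c l =>
    rw [pvTailA_eq _ _ (by simp)]
    exact (pvRuns (c :: l)).1 p

-- ===== VERDICT (by name: the statement is the Claim_ definition above) =====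
theorem patternPath_spec : Claim_equal_patternPath := by
  intro path _
  unfold Spec_patternPath
  simp only [patternPath, patternPath_alt]
  rw [pvLast_eq]
  by_cases hf : PySem.Chars.find ((PySem.List.pyGet? ((PySem.Chars.split? path.toList ['/']).getD []) (-1)).getD []) ['.'] = 0
  · simp only [hf, ne_eq, not_true_eq_false]
    rw [pvCore]
    simp
  · simp only [ne_eq, hf, not_false_iff, if_true]
    rw [pvCore]
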